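-- pv_equiv track=rewrite | github.com/nagarjunpl/DSA_IN_PYTHON | Strings/Minimun_additions_stepwise.py | solution
-- ===== SOURCE A (Python) =====
-- def solution(structures):
--     def get_min_additions(arr):
--         n = len(arr)
--         # To find the minimum additions for a stepwise pattern (arr[i] = x + i),
--         # we must find the smallest starting height 'x' such that:
--         # This simplifies to: x >= arr[i] - i.
--
--         max_diff = -float('inf')
--         for i in range(n):
--             diff = arr[i] - i
--             if diff > max_diff:
--                 max_diff = diff
--
--         # max_diff is our starting 'x'. The target height for index i is max_diff + i.
--         total_additions = 0
--         for i in range(n):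
--             target_height = max_diff + i
--             total_additions += (target_height - arr[i])
--
--         return total_additions
--
--     # For descending, we reverse the array and treat it as an ascending problem
--     ascending_cost = get_min_additions(structures)
--     descending_cost = get_min_additions(structures[::-1])
--
--     return min(ascending_cost, descending_cost)
-- ===== SOURCE B (Python) =====
-- def solution(structures):
--     n = len(structures)
--     if n == 0:
--         return 0
--     best_asc = structures[0]
--     best_desc = structures[0]
--     total = 0
--     for i, s in enumerate(structures):
--         if s - i > best_asc:
--             best_asc = s - i
--         if s + i > best_desc:
--             best_desc = s + i
--         total += s
--     half = n * (n - 1) // 2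
--     return min(n * best_asc + half - total, n * best_desc - half - total)
-- ===== Notes on version B (the rewrite author's own statement) =====
-- stated objective: faster
-- what changed: Replaces the helper with its two passes plus a reversed copy (four loops and a list reversal) by one single pass tracking max(s-i), max(s+i) and the total, then closed-form arithmetic n*best ± n(n-1)/2 - total for both orientations.
import Mathlib
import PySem

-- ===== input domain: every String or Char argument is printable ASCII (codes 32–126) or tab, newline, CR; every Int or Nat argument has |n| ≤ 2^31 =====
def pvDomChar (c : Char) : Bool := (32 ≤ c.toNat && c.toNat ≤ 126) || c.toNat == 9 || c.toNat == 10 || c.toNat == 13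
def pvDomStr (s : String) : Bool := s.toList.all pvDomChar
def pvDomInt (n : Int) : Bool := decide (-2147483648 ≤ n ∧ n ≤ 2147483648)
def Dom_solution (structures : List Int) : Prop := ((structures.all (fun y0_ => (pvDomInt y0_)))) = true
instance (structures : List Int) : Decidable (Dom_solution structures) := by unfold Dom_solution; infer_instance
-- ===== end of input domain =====

-- B replaces A's helper (two passes, run on the list and on a reversed copy: four loops) by one
-- single pass tracking max(s-i), max(s+i) and the total, plus closed-form arithmetic.

-- ===== PORT A =====
-- Python's max_diff starts at -float('inf'): ported as Option Int (none = -inf); in the second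
-- loop max_diff is only read when the range is nonempty, where it is `some m`, so `.getD 0` is exact.
def solutionGetMin (arr : List Int) : Int :=
  let n := arr.length
  let maxDiff : Option Int :=
    (PySem.List.pyRange 0 (n : Int) 1).foldl
      (fun md i =>
        match md with
        | none => some (PySem.List.pyGetD arr i 0 - i)
        | some m => if PySem.List.pyGetD arr i 0 - i > m then some (PySem.List.pyGetD arr i 0 - i) else some m)
      none
  (PySem.List.pyRange 0 (n : Int) 1).foldl
    (fun acc i => acc + (maxDiff.getD 0 + i - PySem.List.pyGetD arr i 0)) 0

def solution (structures : List Int) : Int :=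
  let ascendingCost := solutionGetMin structures
  let descendingCost := solutionGetMin ((PySem.List.slice? structures none none (-1)).getD [])
  min ascendingCost descendingCost

-- ===== PORT B =====
def solutionAltLoop : List Int → Int → Int × Int × Int → Int × Int × Int
  | [], _, st => st
  | s :: rest, i, (ba, bd, tot) =>
      solutionAltLoop rest (i + 1)
        (if s - i > ba then s - i else ba,
         if s + i > bd then s + i else bd,
         tot + s)

def solution_alt (structures : List Int) : Int :=
  match structures with
  | [] => 0
  | h :: _ =>
    let n : Int := (structures.length : Int)
    let st := solutionAltLoop structures 0 (h, h, 0)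
    let half := PySem.Int.floordiv (n * (n - 1)) 2
    min (n * st.1 + half - st.2.2) (n * st.2.1 - half - st.2.2)

-- ===== PRECONDITION & SPEC =====
def Spec_solution (structures : List Int) (out : Int) : Prop := out = solution_alt structures
instance (structures : List Int) (out : Int) : Decidable (Spec_solution structures out) := by unfold Spec_solution; infer_instance

-- ===== CLAIM (what is proved, stated in full; the proofs are below) =====
def Claim_equal_solution : Prop := ∀ (structures : List Int), Dom_solution structures → Spec_solution structures (solution structures)

-- ===== LEMMAS AND PROOFS =====

-- generic fold over a list together with a running integer index
def idxFold {σ : Type} (g : σ → Int → Int → σ) : List Int → Int → σ → σ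
  | [], _, acc => acc
  | x :: xs, i, acc => idxFold g xs (i + 1) (g acc i x)

-- the lists [arr[i] - (a+i)] and [arr[i] + (a+i)]
def dl (a : Int) : List Int → List Int
  | [] => []
  | x :: xs => (x - a) :: dl (a + 1) xs

def sl (a : Int) : List Int → List Int
  | [] => []
  | x :: xs => (x + a) :: sl (a + 1) xs

def tri : Nat → Int
  | 0 => 0
  | n + 1 => tri n + n

-- a Python loop "for i in range(len(arr)): … arr[i] …" is idxFold over arr
theorem bridge {σ : Type} (g : σ → Int → Int → σ) :
    ∀ (xs pre : List Int) (init : σ),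
      (PySem.List.pyRange (pre.length : Int) ((pre.length : Int) + (xs.length : Int)) 1).foldl
          (fun acc i => g acc i (PySem.List.pyGetD (pre ++ xs) i 0)) init
        = idxFold g xs (pre.length : Int) init := by
  intro xs
  induction xs with
  | nil =>
    intro pre init
    rw [PySem.List.pyRange_one_eq_nil (by simp)]
    simp [idxFold]
  | cons x xs ih =>
    intro pre init
    rw [PySem.List.pyRange_one_cons (by push_cast [List.length_cons]; omega)]
    simp only [List.foldl_cons]
    have hv : PySem.List.pyGetD (pre ++ x :: xs) ((pre.length : Int)) 0 = x := by
      rw [PySem.List.pyGetD_natCast]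
      simp [List.getD]
    rw [hv]
    have harr : pre ++ x :: xs = (pre ++ [x]) ++ xs := by simp
    have hlen : ((pre.length : Int)) + 1 = (((pre ++ [x]).length : Int)) := by simp
    have hlen2 : ((pre.length : Int)) + ((x :: xs).length : Int)
        = (((pre ++ [x]).length : Int)) + ((xs.length : Int)) := by
      simp [List.length_cons]; ring
    rw [harr, hlen2, hlen, ih (pre ++ [x]) (g init (pre.length : Int) x), idxFold, hlen]

theorem bridge0 {σ : Type} (g : σ → Int → Int → σ) (xs : List Int) (init : σ) :
    (PySem.List.pyRange 0 ((xs.length : Int)) 1).foldl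
        (fun acc i => g acc i (PySem.List.pyGetD xs i 0)) init
      = idxFold g xs 0 init := by
  have h := bridge g xs [] init
  simpa using h

-- the functions A's two loops fold with
def mdG : Option Int → Int → Int → Option Int := fun md i v =>
  match md with
  | none => some (v - i)
  | some m => if v - i > m then some (v - i) else some m

theorem ite_gt_eq_max (m d : Int) : (if d > m then d else m) = max m d := by
  split_ifs with h <;> omega

theorem mdFold_eq (arr : List Int) (init : Option Int) :
    (PySem.List.pyRange 0 ((arr.length : Int)) 1).foldl
      (fun md i =>
        match md with
        | none => some (PySem.List.pyGetD arr i 0 - i)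
        | some m => if PySem.List.pyGetD arr i 0 - i > m then some (PySem.List.pyGetD arr i 0 - i) else some m)
      init
    = idxFold mdG arr 0 init := by
  exact bridge0 mdG arr init

theorem tFold_bridge (arr : List Int) (m init : Int) :
    (PySem.List.pyRange 0 ((arr.length : Int)) 1).foldl
      (fun acc i => acc + (m + i - PySem.List.pyGetD arr i 0)) init
    = idxFold (fun acc i v => acc + (m + i - v)) arr 0 init := by
  exact bridge0 (fun acc i v => acc + (m + i - v)) arr init

theorem md_some : ∀ (xs : List Int) (a m : Int),
    idxFold mdG xs a (some m) = some ((dl a xs).foldl max m) := by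
  intro xs
  induction xs with
  | nil => intro a m; simp [idxFold, dl]
  | cons x xs ih =>
    intro a m
    simp only [idxFold, mdG, dl, List.foldl_cons]
    rw [show (if x - a > m then some (x - a) else some m) = some (max m (x - a)) by
      rw [← ite_gt_eq_max]; split_ifs <;> rfl]
    exact ih (a + 1) (max m (x - a))

theorem md_cons (x : Int) (xs : List Int) (a : Int) :
    idxFold mdG (x :: xs) a none = some ((dl a (x :: xs)).foldl max (x - a)) := by
  simp only [idxFold, mdG, dl, List.foldl_cons, max_self]
  exact md_some xs (a + 1) (x - a)

theorem tFold_eq (m : Int) : ∀ (xs : List Int) (a acc : Int),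
    idxFold (fun acc i v => acc + (m + i - v)) xs a acc
      = acc + (xs.length : Int) * m + (xs.length : Int) * a + tri xs.length - xs.sum := by
  intro xs
  induction xs with
  | nil => intro a acc; simp [idxFold, tri]
  | cons x xs ih =>
    intro a acc
    simp only [idxFold, List.length_cons, List.sum_cons]
    rw [ih (a + 1) (acc + (m + a - x))]
    simp only [tri]
    push_cast
    ring

theorem bLoop_eq : ∀ (xs : List Int) (a ba bd tot : Int),
    solutionAltLoop xs a (ba, bd, tot)
      = ((dl a xs).foldl max ba, (sl a xs).foldl max bd, tot + xs.sum) := by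
  intro xs
  induction xs with
  | nil => intro a ba bd tot; simp [solutionAltLoop, dl, sl]
  | cons s xs ih =>
    intro a ba bd tot
    simp only [solutionAltLoop, dl, sl, List.foldl_cons, List.sum_cons, ite_gt_eq_max]
    rw [ih]
    simp only [Prod.mk.injEq]
    refine ⟨trivial, trivial, by ring⟩

-- foldl max algebra
theorem foldl_max_comm : ∀ (l : List Int) (m x : Int),
    l.foldl max (max m x) = max x (l.foldl max m) := by
  intro l
  induction l with
  | nil => intro m x; simp [max_comm]
  | cons y l ih =>
    intro m x
    simp only [List.foldl_cons]
    rw [show max (max m x) y = max (max m y) x by rw [max_right_comm], ih]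

theorem foldl_max_reverse : ∀ (l : List Int) (m : Int),
    l.reverse.foldl max m = l.foldl max m := by
  intro l
  induction l with
  | nil => intro m; rfl
  | cons x l ih =>
    intro m
    simp only [List.reverse_cons, List.foldl_append, List.foldl_cons, List.foldl_nil, ih,
      List.foldl_cons, foldl_max_comm]
    rw [max_comm]

theorem foldl_max_shift : ∀ (l : List Int) (m c : Int),
    (l.map (fun y => y - c)).foldl max m = l.foldl max (m + c) - c := by
  intro l
  induction l with
  | nil => intro m c; simp
  | cons x l ih =>
    intro m c
    simp only [List.map_cons, List.foldl_cons]
    rw [ih, show max m (x - c) + c = max (m + c) x by omega]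

theorem foldl_max_le : ∀ (l : List Int) (m c : Int), m ≤ c → (∀ x ∈ l, x ≤ c) →
    l.foldl max m ≤ c := by
  intro l
  induction l with
  | nil => intro m c hm _; simpa using hm
  | cons x l ih =>
    intro m c hm hl
    simp only [List.foldl_cons]
    exact ih _ c (by have := hl x (by simp); omega) (fun y hy => hl y (by simp [hy]))

theorem foldl_max_init_irrel (l : List Int) (a b : Int) (ha : a ∈ l) (hb : b ∈ l) :
    l.foldl max a = l.foldl max b := by
  have h1 := PySem.List.le_foldl_max l a
  have h2 := PySem.List.le_foldl_max l b
  exact le_antisymm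
    (foldl_max_le l a _ (h2.2 a ha) (fun x hx => h2.2 x hx))
    (foldl_max_le l b _ (h1.2 b hb) (fun x hx => h1.2 x hx))

-- shift / append / reverse structure of dl and sl
theorem sl_shift : ∀ (xs : List Int) (a b : Int), sl a xs = (sl b xs).map (fun y => y + (a - b)) := by
  intro xs
  induction xs with
  | nil => intro a b; rfl
  | cons x xs ih =>
    intro a b
    simp only [sl, List.map_cons]
    rw [ih (a + 1) (b + 1)]
    simp only [show a + 1 - (b + 1) = a - b from by ring,
      show x + b + (a - b) = x + a from by ring]

theorem dl_append : ∀ (xs ys : List Int) (a : Int),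
    dl a (xs ++ ys) = dl a xs ++ dl (a + (xs.length : Int)) ys := by
  intro xs
  induction xs with
  | nil => intro ys a; simp [dl]
  | cons x xs ih =>
    intro ys a
    simp only [List.cons_append, dl, ih, List.length_cons]
    rw [show a + 1 + (xs.length : Int) = a + ((xs.length : Nat) + 1 : Nat) by push_cast; ring]

theorem sl_append : ∀ (xs ys : List Int) (a : Int),
    sl a (xs ++ ys) = sl a xs ++ sl (a + (xs.length : Int)) ys := by
  intro xs
  induction xs with
  | nil => intro ys a; simp [sl]
  | cons x xs ih =>
    intro ys a
    simp only [List.cons_append, sl, ih, List.length_cons]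
    rw [show a + 1 + (xs.length : Int) = a + ((xs.length : Nat) + 1 : Nat) by push_cast; ring]

theorem dl_rev : ∀ (xs : List Int) (a : Int),
    dl a xs.reverse = ((sl 0 xs).map (fun y => y - (a + (xs.length : Int) - 1))).reverse := by
  intro xs
  induction xs with
  | nil => intro a; rfl
  | cons x xs ih =>
    intro a
    simp only [List.reverse_cons, dl_append, ih, sl, List.length_reverse, List.length_cons,
      List.map_cons, List.reverse_cons, dl]
    have hc : (((xs.length + 1 : Nat)) : Int) = (xs.length : Int) + 1 := by push_cast; ring
    congr 1
    · rw [sl_shift xs (0 + 1) 0, List.map_map]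
      congr 1
      refine List.map_congr_left (fun y _ => ?_)
      simp only [Function.comp_apply, hc]
      ring
    · simp only [hc]
      congr 1
      ring

-- half = tri
theorem two_tri : ∀ n : Nat, 2 * tri n = (n : Int) * ((n : Int) - 1) := by
  intro n
  induction n with
  | zero => rfl
  | succ n ih => simp only [tri]; push_cast; push_cast at ih; linarith

theorem half_eq (n : Nat) : PySem.Int.floordiv ((n : Int) * ((n : Int) - 1)) 2 = tri n := by
  rw [← two_tri n, PySem.Int.floordiv_eq_iff_of_pos (by norm_num)]
  constructor <;> omega

-- the closed form of A's helper on a nonempty list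
theorem getMin_cons (x : Int) (xs : List Int) :
    solutionGetMin (x :: xs)
      = (((x :: xs).length : Int)) * ((dl 0 (x :: xs)).foldl max (x - 0))
        + tri (x :: xs).length - (x :: xs).sum := by
  simp only [solutionGetMin]
  rw [mdFold_eq, md_cons, tFold_bridge, tFold_eq]
  simp only [Option.getD_some]
  ring

-- ===== VERDICT (by name: the statement is the Claim_ definition above) =====
theorem solution_spec : Claim_equal_solution := by
  unfold Claim_equal_solution
  intro structures _
  unfold Spec_solution
  cases structures with
  | nil => rfl
  | cons h t =>
    -- B side closed form
    have hB : solution_alt (h :: t) =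
        min ((((h :: t).length : Int)) * ((dl 0 (h :: t)).foldl max h)
              + tri (h :: t).length - (h :: t).sum)
            ((((h :: t).length : Int)) * ((sl 0 (h :: t)).foldl max h)
              - tri (h :: t).length - (h :: t).sum) := by
      simp only [solution_alt, bLoop_eq, half_eq, zero_add]
    -- A side
    have hrev : (PySem.List.slice? (h :: t) none none (-1)).getD [] = (h :: t).reverse := by
      rw [PySem.List.slice?_none_none_neg_one]; rfl
    obtain ⟨r0, rt, hr⟩ := List.exists_cons_of_ne_nil (l := (h :: t).reverse) (by simp)
    have hback : (h :: t) = rt.reverse ++ [r0] := by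
      rw [← List.reverse_reverse (h :: t), hr, List.reverse_cons]
    have hlen : (r0 :: rt).length = (h :: t).length := by
      rw [← hr, List.length_reverse]
    have hsum : (r0 :: rt).sum = (h :: t).sum := by
      rw [← hr, List.sum_reverse]
    have hA : solution (h :: t)
        = min (solutionGetMin (h :: t)) (solutionGetMin ((h :: t).reverse)) := by
      simp only [solution, hrev]
    -- the descending max over the reversed list, re-expressed over sl of the original
    have hmem1 : h ∈ sl 0 (h :: t) := by simp [sl]
    have hmem2 : r0 - 0 + (0 + ((h :: t).length : Int) - 1) ∈ sl 0 (h :: t) := by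
      rw [hback, sl_append]
      refine List.mem_append_right _ ?_
      have hs : sl (0 + (rt.reverse.length : Int)) [r0]
          = [r0 + (0 + (rt.reverse.length : Int))] := rfl
      rw [hs, List.mem_singleton, List.length_reverse]
      have hl : (rt.reverse ++ [r0]).length = rt.length + 1 := by simp
      rw [hl]
      push_cast
      ring
    have hM2 : (dl 0 ((h :: t).reverse)).foldl max (r0 - 0)
        = (sl 0 (h :: t)).foldl max h - (0 + ((h :: t).length : Int) - 1) := by
      rw [dl_rev, foldl_max_reverse, foldl_max_shift,
        foldl_max_init_irrel _ _ h hmem2 hmem1]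
    rw [hA, hB, getMin_cons h t]
    rw [hr, getMin_cons r0 rt]
    rw [hlen, hsum, ← hr, hM2]
    have htwo := two_tri (h :: t).length
    congr 1
    · rw [sub_zero]
    · linear_combination htwo
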